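-- pv_equiv track=rewrite | github.com/cristihainic/topcoder | DiskSpace.py | minDrives
-- ===== SOURCE A (Python) =====
-- def minDrives(used, total):
--
--     total_memory_needed = 0
--     drives_needed = 0
--
--     for i in used:
--         total_memory_needed += i
--
--     for i in sorted(total, reverse=True):
--         if total_memory_needed > 0:
--             total_memory_needed -= i
--             drives_needed += 1
--
--     return drives_needed
-- ===== SOURCE B (Python) =====
-- def minDrives(used, total):
--     target = sum(used)
--     prefix = []
--     s = 0
--     for c in sorted(total, reverse=True):
--         s += c
--         prefix.append(s)
--     if target <= 0:
--         return 0
--     for k, p in enumerate(prefix):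
--         if p >= target:
--             return k + 1
--     return len(total)
-- ===== Notes on version B (the rewrite author's own statement) =====
-- stated objective: alternative
-- what changed: Replaces the subtract-and-count scan over all drives with a prefix-sum table over the descending capacities and an early-exit search for the first cumulative sum reaching the needed space (0 if nothing is needed, len(total) if never reached).
import Mathlib
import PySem

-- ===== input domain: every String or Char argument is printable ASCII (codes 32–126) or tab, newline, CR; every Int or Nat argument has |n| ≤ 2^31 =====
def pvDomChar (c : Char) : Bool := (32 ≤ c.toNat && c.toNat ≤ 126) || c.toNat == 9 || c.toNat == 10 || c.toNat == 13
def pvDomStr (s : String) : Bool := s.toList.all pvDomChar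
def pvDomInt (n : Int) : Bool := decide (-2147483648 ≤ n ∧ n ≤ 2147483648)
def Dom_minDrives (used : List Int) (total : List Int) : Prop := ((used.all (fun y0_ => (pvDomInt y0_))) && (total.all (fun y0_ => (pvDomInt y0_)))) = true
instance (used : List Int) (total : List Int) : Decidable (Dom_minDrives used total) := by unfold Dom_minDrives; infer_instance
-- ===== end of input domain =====

-- B replaces A's subtract-and-count scan over every drive by a prefix-sum table over the
-- descending capacities plus an early-exit search for the first cumulative sum reaching the
-- needed space (objective: alternative decomposition, same asymptotic cost).


-- ===== PORT A =====
def minDrives (used : List Int) (total : List Int) : Int :=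
  let total_memory_needed : Int := used.foldl (fun acc i => acc + i) 0
  let st := (PySem.List.sorted total (fun x => x) true).foldl
    (fun (s : Int × Int) i => if s.1 > 0 then (s.1 - i, s.2 + 1) else s)
    (total_memory_needed, 0)
  st.2

-- ===== PORT B =====
-- the enumerate-search loop of Source B: k is the running index, fb the fallback len(total)
def mdSearch (target : Int) : List Int → Int → Int → Int
  | [], _, fb => fb
  | p :: rest, k, fb => if p ≥ target then k + 1 else mdSearch target rest (k + 1) fb

def minDrives_alt (used : List Int) (total : List Int) : Int :=
  let target : Int := used.sum
  let pref := ((PySem.List.sorted total (fun x => x) true).foldl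
    (fun (a : List Int × Int) c => (a.1 ++ [a.2 + c], a.2 + c)) (([] : List Int), 0)).1
  if target ≤ 0 then 0
  else mdSearch target pref 0 (total.length : Int)

-- ===== PRECONDITION & SPEC =====
def Spec_minDrives (used : List Int) (total : List Int) (out : Int) : Prop := out = minDrives_alt used total
instance (used : List Int) (total : List Int) (out : Int) : Decidable (Spec_minDrives used total out) := by unfold Spec_minDrives; infer_instance

-- ===== CLAIM (what is proved, stated in full; the proofs are below) =====
def Claim_equal_minDrives : Prop := ∀ (used : List Int) (total : List Int), Dom_minDrives used total → Spec_minDrives used total (minDrives used total)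

-- ===== LEMMAS AND PROOFS =====

-- greedy reference: number of drives A counts given remaining need r
def mdGo : List Int → Int → Int
  | [], _ => 0
  | y :: ys, r => if r > 0 then 1 + mdGo ys (r - y) else 0

theorem mdGo_nonpos (ys : List Int) (r : Int) (h : ¬ r > 0) : mdGo ys r = 0 := by
  cases ys with
  | nil => rfl
  | cons y t => simp [mdGo, h]

theorem foldA_eq_mdGo (ys : List Int) (r c : Int) :
    (ys.foldl (fun (s : Int × Int) i => if s.1 > 0 then (s.1 - i, s.2 + 1) else s) (r, c)).2
    = c + mdGo ys r := by
  induction ys generalizing r c with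
  | nil => simp [mdGo]
  | cons y t ih =>
    by_cases h : r > 0
    · simp only [List.foldl_cons, mdGo, ih, if_pos h]
      ring
    · simp only [List.foldl_cons, if_neg h, ih, mdGo_nonpos t r h, add_zero]
      simp [mdGo, h]

-- the prefix sums of ys starting from running sum s
def mdPrefix (s : Int) : List Int → List Int
  | [] => []
  | c :: cs => (s + c) :: mdPrefix (s + c) cs

theorem foldPrefix_eq (ys : List Int) (p : List Int) (s : Int) :
    (ys.foldl (fun (a : List Int × Int) c => (a.1 ++ [a.2 + c], a.2 + c)) (p, s)).1
    = p ++ mdPrefix s ys := by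
  induction ys generalizing p s with
  | nil => simp [mdPrefix]
  | cons c cs ih => simp [mdPrefix, ih]

theorem mdSearch_eq_mdGo (target : Int) (ys : List Int) (r k : Int)
    (hr : r > 0) :
    mdSearch target (mdPrefix (target - r) ys) k (k + (ys.length : Int))
    = k + mdGo ys r := by
  induction ys generalizing r k with
  | nil => simp [mdPrefix, mdSearch, mdGo]
  | cons y t ih =>
    simp only [mdPrefix, mdSearch, mdGo, if_pos hr]
    by_cases h : target - r + y ≥ target
    · have h2 : ¬ (r - y) > 0 := by omega
      rw [if_pos h, mdGo_nonpos t (r - y) h2]; ring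
    · have h2 : (r - y) > 0 := by omega
      rw [if_neg h]
      have harg : target - r + y = target - (r - y) := by ring
      rw [harg]
      have := ih (r - y) (k + 1) h2
      simp only [List.length_cons]
      have hlen : k + ((t.length : Int) + 1) = (k + 1) + (t.length : Int) := by ring
      rw [show ((t.length + 1 : Nat) : Int) = (t.length : Int) + 1 by push_cast; ring, hlen, this]
      ring

-- ===== VERDICT (by name: the statement is the Claim_ definition above) =====
theorem minDrives_spec : Claim_equal_minDrives := by
  intro used total _
  unfold Spec_minDrives minDrives minDrives_alt
  simp only
  set ys := PySem.List.sorted total (fun x => x) true with hys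
  have hsum : used.foldl (fun acc i => acc + i) 0 = used.sum := by
    rw [List.sum_eq_foldl]
  rw [foldA_eq_mdGo, hsum, foldPrefix_eq, List.nil_append]
  by_cases h : used.sum ≤ 0
  · rw [if_pos h, mdGo_nonpos ys used.sum (by omega), zero_add]
  · rw [if_neg h]
    have hlen : (total.length : Int) = (0 : Int) + (ys.length : Int) := by
      rw [hys, PySem.List.length_sorted]; ring
    have := mdSearch_eq_mdGo used.sum ys used.sum 0 (by omega)
    rw [hlen]
    simp only [sub_self] at this
    rw [this, zero_add]
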